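-- pv_equiv track=rewrite | github.com/tedeyang/Agent-First-Organization | benchmark/tau_bench/model_utils/model/utils.py | try_classify_recover
-- ===== SOURCE A (Python) =====
-- def longest_valid_string(s: str, options: list[str]) -> str | None:
--     longest: int = 0
--     longest_str: str | None = None
--     options_set: set[str] = set(options)
--     for i in range(len(s)):
--         if s[: i + 1] in options_set and i + 1 > longest:
--             longest = i + 1
--             longest_str = s[: i + 1]
--     return longest_str
--
-- def try_classify_recover(s: str, decode_map: dict[str, int]) -> str | None:
--     lvs: str | None = longest_valid_string(s, list(decode_map.keys()))
--     if lvs is not None and lvs in decode_map: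
--         return lvs
--     for k, v in decode_map.items():
--         if s == v:
--             return k
--     return None
-- ===== SOURCE B (Python) =====
-- def try_classify_recover(s: str, decode_map: dict[str, int]) -> str | None:
--     # Scan the keys longest-first instead of enumerating every prefix of s:
--     # the first non-empty key that is a prefix of s is the longest matching key.
--     # (A's trailing `s == v` loop compares a str with an int and can never fire.)
--     for k in sorted(decode_map, key=len, reverse=True):
--         if k and s.startswith(k):
--             return k
--     return None
-- ===== Notes on version B (the rewrite author's own statement) =====
-- stated objective: simpler
-- what changed: Instead of enumerating every prefix of s and tracking the longest one found in a set of the keys (plus a dead str==int recovery loop), B sorts the keys by length descending and returns the first non-empty key that s starts with.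
import Mathlib
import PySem

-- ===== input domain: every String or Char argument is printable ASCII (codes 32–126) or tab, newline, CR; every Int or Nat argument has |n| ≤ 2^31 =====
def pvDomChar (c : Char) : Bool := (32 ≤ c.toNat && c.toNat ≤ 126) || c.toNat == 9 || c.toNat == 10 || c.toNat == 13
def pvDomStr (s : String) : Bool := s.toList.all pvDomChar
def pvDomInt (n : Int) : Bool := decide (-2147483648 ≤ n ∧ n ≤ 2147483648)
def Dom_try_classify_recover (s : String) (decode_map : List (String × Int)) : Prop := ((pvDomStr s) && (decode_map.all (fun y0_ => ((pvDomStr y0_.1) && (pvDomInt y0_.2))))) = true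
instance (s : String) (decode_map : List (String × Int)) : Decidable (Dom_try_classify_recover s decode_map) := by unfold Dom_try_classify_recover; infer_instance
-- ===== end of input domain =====

-- B drops A's prefix-enumeration (and A's dead str==int recovery loop) and instead returns the
-- first non-empty key, scanned longest-first, that s starts with; objective: simpler.

-- ===== PORT A =====
def longest_valid_string (s : String) (options : List String) : Option String :=
  let options_set : PySem.Set String := PySem.Set.ofList options
  ((PySem.List.pyRange 0 (PySem.Str.len s)).foldl
    (fun (acc : Int × Option String) i =>
      if (PySem.Set.contains options_set (PySem.Str.slice s none (some (i + 1)))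
            && decide (i + 1 > acc.1))
      then (i + 1, some (PySem.Str.slice s none (some (i + 1))))
      else acc) ((0 : Int), (none : Option String))).2

-- A's 'if s == v:' compares a str with an int: in Python that comparison is always False,
-- so it is ported as the Bool literal false.
def recoverLoop (s : String) (items : List (String × Int)) : Option String :=
  match items with
  | [] => none
  | (k, _v) :: rest => if (false : Bool) then some k else recoverLoop s rest

def try_classify_recover (s : String) (decode_map : List (String × Int)) : Option String :=
  match longest_valid_string s (PySem.Dict.keys (PySem.Dict.ofList decode_map)) with
  | some lvs =>
      if PySem.Dict.contains (PySem.Dict.ofList decode_map) lvs then some lvs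
      else recoverLoop s (PySem.Dict.items (PySem.Dict.ofList decode_map))
  | none => recoverLoop s (PySem.Dict.items (PySem.Dict.ofList decode_map))

-- ===== PORT B =====
def try_classify_recover_alt (s : String) (decode_map : List (String × Int)) : Option String :=
  (PySem.List.sorted (PySem.Dict.keys (PySem.Dict.ofList decode_map))
      (fun k => PySem.Str.len k) true).find?
    (fun k => !(k == "") && PySem.Str.startswith s k)

-- ===== PRECONDITION & SPEC =====
def Spec_try_classify_recover (s : String) (decode_map : List (String × Int)) (out : Option String) : Prop := out = try_classify_recover_alt s decode_map
instance (s : String) (decode_map : List (String × Int)) (out : Option String) : Decidable (Spec_try_classify_recover s decode_map out) := by unfold Spec_try_classify_recover; infer_instance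

-- ===== CLAIM (what is proved, stated in full; the proofs are below) =====
def Claim_equal_try_classify_recover : Prop := ∀ (s : String) (decode_map : List (String × Int)), Dom_try_classify_recover s decode_map → Spec_try_classify_recover s decode_map (try_classify_recover s decode_map)

-- ===== LEMMAS AND PROOFS =====

-- the prefix of s of (clamped) length m, as A's slice computes it
def pref (s : String) (m : Nat) : String := PySem.Str.slice s none (some (m : Int))

-- the length (1-based) of the longest prefix of s among the first n prefix lengths that is in ks
def bestA (s : String) (ks : List String) : Nat → Option Nat
  | 0 => none
  | n + 1 => if pref s (n + 1) ∈ ks then some (n + 1) else bestA s ks n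

theorem toList_pref (s : String) (m : Nat) : (pref s m).toList = s.toList.take m := by
  simp [pref, PySem.Str.toList_slice, PySem.Chars.slice_eq_listSlice, PySem.List.slice_to_natCast]

theorem length_pref (s : String) (m : Nat) :
    (pref s m).toList.length = min m s.toList.length := by
  rw [toList_pref]; simp

theorem strlen_eq (k : String) : PySem.Str.len k = (k.toList.length : Int) := by
  simp [pysem]

theorem pref_eq_of_prefix {s k : String} (h : k.toList <+: s.toList) :
    pref s k.toList.length = k := by
  apply String.ext; rw [toList_pref]; exact (List.prefix_iff_eq_take.1 h).symm

theorem ne_empty_of_length {k : String} (h : 1 ≤ k.toList.length) : k ≠ "" := by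
  intro he; subst he; simp at h

theorem length_of_ne_empty {k : String} (h : k ≠ "") : 1 ≤ k.toList.length := by
  by_contra hc
  apply h; apply String.ext
  have : k.toList.length = 0 := by omega
  simpa using List.length_eq_zero_iff.1 this

theorem P_true_iff (s k : String) :
    ((!(k == "") && PySem.Str.startswith s k) = true) ↔ k ≠ "" ∧ k.toList <+: s.toList := by
  simp [PySem.Str.startswith_eq, PySem.Chars.startswith_iff]

theorem P_pref (s : String) (m : Nat) (hm1 : 1 ≤ m) (hms : m ≤ s.toList.length) :
    (!(pref s m == "") && PySem.Str.startswith s (pref s m)) = true := by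
  rw [P_true_iff]
  refine ⟨ne_empty_of_length ?_, ?_⟩
  · rw [length_pref]; omega
  · rw [toList_pref]; exact List.take_prefix _ _

theorem bestA_spec {s : String} {ks : List String} :
    ∀ {n m : Nat}, bestA s ks n = some m → 1 ≤ m ∧ m ≤ n ∧ pref s m ∈ ks := by
  intro n
  induction n with
  | zero => intro m h; simp [bestA] at h
  | succ n ih =>
    intro m h
    by_cases hc : pref s (n + 1) ∈ ks
    · simp [bestA, hc] at h
      subst h; exact ⟨by omega, le_refl _, hc⟩
    · simp [bestA, hc] at h
      obtain ⟨h1, h2, h3⟩ := ih h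
      exact ⟨h1, by omega, h3⟩

theorem bestA_max {s : String} {ks : List String} :
    ∀ {n m : Nat}, bestA s ks n = some m →
      ∀ j, 1 ≤ j → j ≤ n → pref s j ∈ ks → j ≤ m := by
  intro n
  induction n with
  | zero => intro m h; simp [bestA] at h
  | succ n ih =>
    intro m h j hj1 hjn hjm
    by_cases hc : pref s (n + 1) ∈ ks
    · simp [bestA, hc] at h; omega
    · simp [bestA, hc] at h
      rcases Nat.lt_or_ge j (n + 1) with hlt | hge
      · exact ih h j hj1 (by omega) hjm
      · exfalso
        have hj : j = n + 1 := by omega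
        subst hj
        exact hc hjm

theorem bestA_none {s : String} {ks : List String} :
    ∀ {n : Nat}, bestA s ks n = none →
      ∀ j, 1 ≤ j → j ≤ n → pref s j ∉ ks := by
  intro n
  induction n with
  | zero => intro _ j hj1 hjn; omega
  | succ n ih =>
    intro h j hj1 hjn
    by_cases hc : pref s (n + 1) ∈ ks
    · simp [bestA, hc] at h
    · simp [bestA, hc] at h
      rcases Nat.lt_or_ge j (n + 1) with hlt | hge
      · exact ih h j hj1 (by omega)
      · have hj : j = n + 1 := by omega
        subst hj
        exact hc

theorem foldA (s : String) (ks : List String) (n : Nat) :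
    ((PySem.List.pyRange 0 (n : Int)).foldl
      (fun (acc : Int × Option String) i =>
        if (PySem.Set.contains (PySem.Set.ofList ks) (PySem.Str.slice s none (some (i + 1)))
              && decide (i + 1 > acc.1))
        then (i + 1, some (PySem.Str.slice s none (some (i + 1))))
        else acc) ((0 : Int), (none : Option String)))
    = (match bestA s ks n with
       | none => ((0 : Int), (none : Option String))
       | some m => ((m : Int), some (pref s m))) := by
  induction n with
  | zero =>
    rw [show ((0 : Nat) : Int) = 0 by norm_cast, PySem.List.pyRange_one_eq_nil (le_refl 0)]
    simp [bestA]
  | succ n ih =>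
    have hcast : ((n + 1 : Nat) : Int) = (n : Int) + 1 := by push_cast; ring
    rw [hcast, PySem.List.pyRange_one_succ_right (by positivity), List.foldl_append, ih]
    simp only [List.foldl_cons, List.foldl_nil]
    have hslice : PySem.Str.slice s none (some ((n : Int) + 1)) = pref s (n + 1) := by
      unfold pref; norm_cast
    have hc : PySem.Set.contains (PySem.Set.ofList ks) (PySem.Str.slice s none (some ((n : Int) + 1)))
        = decide (pref s (n + 1) ∈ ks) := by
      rw [hslice, Bool.eq_iff_iff, PySem.Set.contains_iff, PySem.Set.mem_ofList, decide_eq_true_iff]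
    cases hb : bestA s ks n with
    | none =>
      by_cases hm : pref s (n + 1) ∈ ks
      · simp [hm, bestA, hslice]
      · simp [hb, hm, bestA]
        rw [hslice]; exact hm
    | some m =>
      have hle : m ≤ n := (bestA_spec hb).2.1
      by_cases hm : pref s (n + 1) ∈ ks
      · have hgt : ((n : Int) + 1 > (m : Int)) := by exact_mod_cast Nat.lt_succ_of_le hle
        simp [hm, bestA, hslice, hgt]
      · simp [hb, hm, bestA]
        rw [hslice]
        intro h
        exact absurd h hm

theorem lvs_eq (s : String) (ks : List String) :
    longest_valid_string s ks = (bestA s ks s.toList.length).map (pref s) := by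
  unfold longest_valid_string
  simp only [strlen_eq]
  rw [foldA]
  cases bestA s ks s.toList.length <;> simp

theorem recoverLoop_none (s : String) (items : List (String × Int)) :
    recoverLoop s items = none := by
  induction items with
  | nil => rfl
  | cons p rest ih => cases p; simpa [recoverLoop] using ih

theorem find_first_max (s : String) (m : Nat) (hm1 : 1 ≤ m) (hms : m ≤ s.toList.length) :
    ∀ (l : List String), l.Pairwise (fun a b => b.toList.length ≤ a.toList.length) →
      pref s m ∈ l →
      (∀ k ∈ l, (!(k == "") && PySem.Str.startswith s k) = true → k.toList.length ≤ m) →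
      l.find? (fun k => !(k == "") && PySem.Str.startswith s k) = some (pref s m) := by
  intro l
  induction l with
  | nil => intro _ hmem _; simp at hmem
  | cons a t ih =>
    intro hpw hmem hmax
    by_cases hPa : (!(a == "") && PySem.Str.startswith s a) = true
    · have hstep : List.find? (fun k => !(k == "") && PySem.Str.startswith s k) (a :: t)
          = some a := List.find?_cons_of_pos hPa
      rw [hstep]
      rcases List.mem_cons.1 hmem with h | h
      · rw [h]
      · have hba : (pref s m).toList.length ≤ a.toList.length :=
          (List.pairwise_cons.1 hpw).1 _ h
        have hpl : (pref s m).toList.length = m := by rw [length_pref]; omega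
        have hlen : a.toList.length ≤ m := hmax a List.mem_cons_self hPa
        have ham : a.toList.length = m := by omega
        have hpre : a.toList <+: s.toList := ((P_true_iff s a).1 hPa).2
        have := pref_eq_of_prefix hpre
        rw [ham] at this
        rw [this]
    · have hstep : List.find? (fun k => !(k == "") && PySem.Str.startswith s k) (a :: t)
          = List.find? (fun k => !(k == "") && PySem.Str.startswith s k) t :=
        List.find?_cons_of_neg hPa
      rw [hstep]
      have hne : pref s m ≠ a := by
        intro he
        apply hPa
        rw [← he]
        exact P_pref s m hm1 hms
      apply ih (List.pairwise_cons.1 hpw).2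
      · rcases List.mem_cons.1 hmem with h | h
        · exact absurd h hne
        · exact h
      · intro k hk hPk; exact hmax k (List.mem_cons_of_mem _ hk) hPk

theorem alt_eq (s : String) (ks : List String) :
    (PySem.List.sorted ks (fun k => PySem.Str.len k) true).find?
        (fun k => !(k == "") && PySem.Str.startswith s k)
      = (bestA s ks s.toList.length).map (pref s) := by
  cases hb : bestA s ks s.toList.length with
  | none =>
    simp only [Option.map_none]
    rw [List.find?_eq_none]
    intro k hk hPk
    rw [PySem.List.mem_sorted] at hk
    obtain ⟨hne, hpre⟩ := (P_true_iff s k).1 hPk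
    have h1 : 1 ≤ k.toList.length := length_of_ne_empty hne
    have h2 : k.toList.length ≤ s.toList.length := hpre.length_le
    have hks : pref s k.toList.length ∈ ks := by rw [pref_eq_of_prefix hpre]; exact hk
    exact bestA_none hb k.toList.length h1 h2 hks
  | some m =>
    obtain ⟨hm1, hms, hmem⟩ := bestA_spec hb
    simp only [Option.map_some]
    apply find_first_max s m hm1 hms
    · have hp := PySem.List.sorted_pairwise_rev ks (fun k => PySem.Str.len k)
      apply hp.imp
      intro a b h
      simp only [strlen_eq] at h
      exact_mod_cast h
    · rw [PySem.List.mem_sorted]; exact hmem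
    · intro k hk hPk
      rw [PySem.List.mem_sorted] at hk
      obtain ⟨hne, hpre⟩ := (P_true_iff s k).1 hPk
      have h1 : 1 ≤ k.toList.length := length_of_ne_empty hne
      have h2 : k.toList.length ≤ s.toList.length := hpre.length_le
      have hks : pref s k.toList.length ∈ ks := by rw [pref_eq_of_prefix hpre]; exact hk
      exact bestA_max hb k.toList.length h1 h2 hks

-- ===== VERDICT (by name: the statement is the Claim_ definition above) =====
theorem try_classify_recover_spec : Claim_equal_try_classify_recover := by
  intro s dm _hdom
  unfold Spec_try_classify_recover try_classify_recover try_classify_recover_alt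
  rw [alt_eq s (PySem.Dict.keys (PySem.Dict.ofList dm)), lvs_eq]
  cases hb : bestA s (PySem.Dict.keys (PySem.Dict.ofList dm)) s.toList.length with
  | none => simp [recoverLoop_none]
  | some m =>
    have hmem := (bestA_spec hb).2.2
    have hcon : (PySem.Dict.ofList dm).contains (pref s m) = true :=
      (PySem.Dict.contains_iff_mem_keys _ _).2 hmem
    simp [hcon]
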